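-- pv_equiv track=rewrite | github.com/Yunif3/tRNA_type_research | tRNA_scraper_2.0.py | find_sequence_end_index
-- ===== SOURCE A (Python) =====
-- def find_sequence_end_index(secondary_structure, loop_type, interval): #interval must be 1 or -1
--     index = -1
--     stem_counter = 0
--     stem_status = 0
--     first_stem_base = True
--
--     if interval == 1:
--         stem_counter_requirement = 0
--         if loop_type == 'vLoop':
--             stem_counter_requirement = 2
--         elif loop_type == 'acLoop':
--             stem_counter_requirement = 1
--
--         acceptor_start_index = 0
--         while not secondary_structure[acceptor_start_index] == '>':
--             acceptor_start_index += 1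
--
--         index = acceptor_start_index + 7
--         while stem_counter < stem_counter_requirement:
--             if secondary_structure[index] == '>':
--                 stem_status += 1
--                 first_stem_base = False
--             elif secondary_structure[index] == '<':
--                 stem_status -= 1
--             if (stem_status == 0) and (first_stem_base is False):
--                 stem_counter += 1
--                 first_stem_base = True
--             index += 1
--
--         while secondary_structure[index] != '>' and loop_type != 'vLoop':  # fixme
--             index += 1
--
--     elif interval == -1:
--         stem_counter_requirement = 0
--         if loop_type == 'vLoop':
--             stem_counter_requirement = 1
--
--         acceptor_start_index = len(secondary_structure) - 1
--         while not secondary_structure[acceptor_start_index] == '<':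
--             acceptor_start_index -= 1
--         index = acceptor_start_index - 7
--
--         if loop_type == 'tLoop':  # fixme this is because the tLoop stem starts right after the 3' acceptor stem
--             return index
--
--         while stem_counter < stem_counter_requirement:
--             if secondary_structure[index] == '>':
--                 stem_status += 1
--             elif secondary_structure[index] == '<':
--                 stem_status -= 1
--                 first_stem_base = False
--             if (stem_status == 0) and (first_stem_base is False):
--                 stem_counter += 1
--                 first_stem_base = True
--             index -= 1
--
--         while secondary_structure[index] != '<' and loop_type != 'vLoop':  # fixme
--             index -= 1
--     return index
-- ===== SOURCE B (Python) =====
-- def find_sequence_end_index(secondary_structure, loop_type, interval):  # interval must be 1 or -1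
--     s = secondary_structure
--     n = len(s)
--     # One precomputed prefix table: pre[k] = (balance, '>'-count) of s[:k].
--     # A balanced stem started at i ends at the first j with pre[j+1][0] == pre[i][0]
--     # having opened (forward: pre[j+1][1] > pre[i][1]); no running counters needed.
--     pre = [(0, 0)]
--     b = g = 0
--     for c in s:
--         b += (c == '>') - (c == '<')
--         g += (c == '>')
--         pre.append((b, g))
--     if interval == 1:
--         i = s.index('>') + 7
--         req = 2 if loop_type == 'vLoop' else 1 if loop_type == 'acLoop' else 0
--         for _ in range(req):
--             i = next(j for j in range(i, n)
--                      if pre[j + 1][0] == pre[i][0] and pre[i][1] < pre[j + 1][1]) + 1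
--         if loop_type != 'vLoop':
--             i = s.index('>', i)
--         return i
--     if interval == -1:
--         i = s.rindex('<') - 7
--         if loop_type == 'tLoop':
--             return i
--         if loop_type == 'vLoop':
--             # '<'-count of s[:k] is pre[k][1] - pre[k][0]
--             return next(j for j in range(i, -1, -1)
--                         if pre[j][0] == pre[i + 1][0]
--                         and pre[j][1] - pre[j][0] < pre[i + 1][1] - pre[i + 1][0]) - 1
--         return next(j for j in range(i, -1, -1) if s[j] == '<')
--     return -1
-- ===== Notes on version B (the rewrite author's own statement) =====
-- stated objective: alternative
-- what changed: Replaces A's running balance/seen-flag stem walks with one precomputed prefix table pre[k]=(balance,'>'-count of s[:k]): stem ends are located by comparing stored prefix values (pre[j+1] against pre[i]), and the acceptor boundary and trailing scans use library searches (str.index/str.rindex) and a generator over a descending range.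
-- outside the precondition, e.g. on find_sequence_end_index('..ab.<b><<', '', -1): A returns -1, B raises StopIteration; on find_sequence_end_index('...>>.a<<abaab', 'vLoop', -1): A returns -12, B raises StopIteration
import Mathlib
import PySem

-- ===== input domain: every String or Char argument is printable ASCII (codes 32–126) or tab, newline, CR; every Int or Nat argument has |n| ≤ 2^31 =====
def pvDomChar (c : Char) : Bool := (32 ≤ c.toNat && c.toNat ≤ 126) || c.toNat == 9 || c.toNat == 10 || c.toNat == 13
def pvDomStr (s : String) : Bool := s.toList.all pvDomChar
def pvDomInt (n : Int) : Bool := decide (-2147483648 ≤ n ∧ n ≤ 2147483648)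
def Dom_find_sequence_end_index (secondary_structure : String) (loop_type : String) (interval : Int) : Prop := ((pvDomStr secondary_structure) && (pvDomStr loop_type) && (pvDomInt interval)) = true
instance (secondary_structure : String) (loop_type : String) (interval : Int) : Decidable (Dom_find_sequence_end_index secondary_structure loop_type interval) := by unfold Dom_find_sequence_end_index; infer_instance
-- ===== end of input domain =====

-- B replaces A's running-counter stem walks by ONE precomputed prefix table
-- pre[k] = (balance, '>'-count) of s[:k]: a stem end is located by comparing
-- stored prefix values (pre[j+1] against pre[i]) instead of maintaining
-- balance/seen state while walking; objective: alternative.  Where the Python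
-- raises (or A's backward scan wraps around via negative indices while B's
-- searches raise), the ports return 0; those inputs are outside Pre_.

-- ===== PORT A =====
-- A's `while` loops, one helper per loop.  `pyGetD` under the `InRange` guard is
-- exactly `s[i]` (negative-index wraparound included); the `else 0` arm is Python's
-- IndexError, excluded by Pre_.  `fuel` only makes the recursion structural; the
-- top-level values below always suffice for every loop that Python finishes.

def aScanF (t : List Char) (fuel : Nat) (i : Int) : Int :=
  match fuel with
  | 0 => 0
  | fuel + 1 =>
    if PySem.Raise.InRange t.length i then
      if PySem.List.pyGetD t i ' ' = '>' then i else aScanF t fuel (i + 1)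
    else 0

def aScanB (t : List Char) (fuel : Nat) (i : Int) : Int :=
  match fuel with
  | 0 => 0
  | fuel + 1 =>
    if PySem.Raise.InRange t.length i then
      if PySem.List.pyGetD t i ' ' = '<' then i else aScanB t fuel (i - 1)
    else 0

def aStemF (t : List Char) (fuel : Nat) (req counter status : Int) (first : Bool) (i : Int) : Int :=
  if counter < req then
    match fuel with
    | 0 => 0
    | fuel + 1 =>
      if PySem.Raise.InRange t.length i then
        let c := PySem.List.pyGetD t i ' '
        let status' := if c = '>' then status + 1 else if c = '<' then status - 1 else status
        let first' := if c = '>' then false else first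
        if status' = 0 ∧ first' = false then aStemF t fuel req (counter + 1) status' true (i + 1)
        else aStemF t fuel req counter status' first' (i + 1)
      else 0
  else i

def aStemB (t : List Char) (fuel : Nat) (req counter status : Int) (first : Bool) (i : Int) : Int :=
  if counter < req then
    match fuel with
    | 0 => 0
    | fuel + 1 =>
      if PySem.Raise.InRange t.length i then
        let c := PySem.List.pyGetD t i ' '
        let status' := if c = '>' then status + 1 else if c = '<' then status - 1 else status
        let first' := if c = '<' then false else first
        if status' = 0 ∧ first' = false then aStemB t fuel req (counter + 1) status' true (i - 1)
        else aStemB t fuel req counter status' first' (i - 1)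
      else 0
  else i

def aScan2F (t : List Char) (fuel : Nat) (lt : String) (i : Int) : Int :=
  match fuel with
  | 0 => 0
  | fuel + 1 =>
    if PySem.Raise.InRange t.length i then
      if PySem.List.pyGetD t i ' ' ≠ '>' ∧ lt ≠ "vLoop" then aScan2F t fuel lt (i + 1) else i
    else 0

def aScan2B (t : List Char) (fuel : Nat) (lt : String) (i : Int) : Int :=
  match fuel with
  | 0 => 0
  | fuel + 1 =>
    if PySem.Raise.InRange t.length i then
      if PySem.List.pyGetD t i ' ' ≠ '<' ∧ lt ≠ "vLoop" then aScan2B t fuel lt (i - 1) else i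
    else 0

def find_sequence_end_index (secondary_structure : String) (loop_type : String) (interval : Int) : Int :=
  let t := secondary_structure.toList
  if interval = 1 then
    let req : Int := if loop_type = "vLoop" then 2 else if loop_type = "acLoop" then 1 else 0
    let acc := aScanF t (t.length + 2) 0
    let idx := aStemF t (t.length + 2) req 0 0 true (acc + 7)
    aScan2F t (t.length + 2) loop_type idx
  else if interval = -1 then
    let req : Int := if loop_type = "vLoop" then 1 else 0
    let acc := aScanB t (2 * t.length + 9) ((t.length : Int) - 1)
    let idx := acc - 7
    if loop_type = "tLoop" then idx
    else aScan2B t (2 * t.length + 9) loop_type (aStemB t (2 * t.length + 9) req 0 0 true idx)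
  else -1

-- ===== PORT B =====
-- Source B's prefix-table build: pre[k] = (balance, '>'-count) of s[:k], length n+1.
def bScan (b g : Int) : List Char → List (Int × Int)
  | [] => [(b, g)]
  | c :: cs =>
    (b, g) :: bScan (b + (if c = '>' then 1 else 0) - (if c = '<' then 1 else 0))
      (g + (if c = '>' then 1 else 0)) cs

-- Source B's forward `next(j for j in range(i, n) if pre[j+1][0]==pre[i][0] and pre[i][1]<pre[j+1][1])`;
-- `[] => 0` / `none => 0` are its StopIteration / IndexError.
def bStemEndF (pre : List (Int × Int)) (i : Int) (rng : List Int) : Int :=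
  match rng with
  | [] => 0
  | j :: rest =>
    match PySem.List.pyGet? pre (j + 1), PySem.List.pyGet? pre i with
    | some p, some q => if p.1 = q.1 ∧ q.2 < p.2 then j else bStemEndF pre i rest
    | _, _ => 0

-- Source B's backward `next(j for j in range(i, -1, -1) if pre[j][0]==pre[i+1][0] and
-- pre[j][1]-pre[j][0] < pre[i+1][1]-pre[i+1][0])`.
def bStemEndB (pre : List (Int × Int)) (i : Int) (rng : List Int) : Int :=
  match rng with
  | [] => 0
  | j :: rest =>
    match PySem.List.pyGet? pre j, PySem.List.pyGet? pre (i + 1) with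
    | some p, some q => if p.1 = q.1 ∧ p.2 - p.1 < q.2 - q.1 then j else bStemEndB pre i rest
    | _, _ => 0

-- Source B's `next(j for j in range(i, -1, -1) if s[j] == '<')`; `[] => 0` is StopIteration.
def bNextLt (t : List Char) (rng : List Int) : Int :=
  match rng with
  | [] => 0
  | j :: rest =>
    match PySem.List.pyGet? t j with
    | none => 0
    | some c => if c = '<' then j else bNextLt t rest

def find_sequence_end_index_alt (secondary_structure : String) (loop_type : String) (interval : Int) : Int :=
  let t := secondary_structure.toList
  let n : Int := (t.length : Int)
  let pre := bScan 0 0 t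
  if interval = 1 then
    let f := PySem.Chars.find t ['>']            -- s.index('>')
    if f = -1 then 0                              -- ValueError
    else
      let reqN : Nat := if loop_type = "vLoop" then 2 else if loop_type = "acLoop" then 1 else 0
      let i := (List.range reqN).foldl
        (fun acc _ => bStemEndF pre acc (PySem.List.pyRange acc n 1) + 1) (f + 7)
      if loop_type ≠ "vLoop" then
        let r := PySem.Chars.findFrom t ['>'] i none   -- s.index('>', i)
        if r = -1 then 0 else r                   -- ValueError
      else i
  else if interval = -1 then
    let q := PySem.Chars.rfind t ['<']           -- s.rindex('<')
    if q = -1 then 0                              -- ValueError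
    else
      let i := q - 7
      if loop_type = "tLoop" then i
      else if loop_type = "vLoop" then bStemEndB pre i (PySem.List.pyRange i (-1) (-1)) - 1
      else bNextLt t (PySem.List.pyRange i (-1) (-1))
  else -1

-- ===== PRECONDITION & SPEC =====
-- Vocabulary for Pre_: segments of the structure string and their stem balance.
def pvSeg (t : List Char) (i j : Nat) : List Char := (t.drop i).take (j + 1 - i)
-- a balanced stem read forward, started at i, whose last character sits at j
abbrev pvStopF (t : List Char) (i j : Nat) : Prop :=
  i ≤ j ∧ j < t.length ∧ (pvSeg t i j).count '>' = (pvSeg t i j).count '<' ∧ '>' ∈ pvSeg t i j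
abbrev pvFirstF (t : List Char) (i j : Nat) : Prop := pvStopF t i j ∧ ∀ j', j' < j → ¬ pvStopF t i j'
-- a balanced stem read backward, started at i, whose last character sits at j
abbrev pvStopB (t : List Char) (j i : Nat) : Prop :=
  j ≤ i ∧ i < t.length ∧ (pvSeg t j i).count '>' = (pvSeg t j i).count '<' ∧ '<' ∈ pvSeg t j i
abbrev pvFirstB (t : List Char) (i j : Nat) : Prop :=
  pvStopB t j i ∧ ∀ j', j' ≤ i → j < j' → ¬ pvStopB t j' i
abbrev pvFirstGt (t : List Char) (p : Nat) : Prop := t[p]? = some '>' ∧ ∀ k, k < p → t[k]? ≠ some '>'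
abbrev pvLastLt (t : List Char) (q : Nat) : Prop :=
  t[q]? = some '<' ∧ ∀ k, k < t.length → q < k → t[k]? ≠ some '<'

-- Pre_ = the inputs on which Python A returns normally AND none of its scans runs
-- below index 0 (where CPython's negative-index wraparound would silently continue);
-- on those wraparound inputs A returns an accidental negative index while B's
-- searches raise, so they are excluded here.
def Pre_find_sequence_end_index (secondary_structure : String) (loop_type : String) (interval : Int) : Prop :=
  if interval = 1 then
    (if loop_type = "vLoop" then
      ∃ p < secondary_structure.toList.length, pvFirstGt secondary_structure.toList p ∧
        ∃ j0 < secondary_structure.toList.length, pvFirstF secondary_structure.toList (p + 7) j0 ∧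
          ∃ j1 < secondary_structure.toList.length, pvFirstF secondary_structure.toList (j0 + 1) j1 ∧
            j1 + 1 < secondary_structure.toList.length
     else if loop_type = "acLoop" then
      ∃ p < secondary_structure.toList.length, pvFirstGt secondary_structure.toList p ∧
        ∃ j0 < secondary_structure.toList.length, pvFirstF secondary_structure.toList (p + 7) j0 ∧
          ∃ m < secondary_structure.toList.length, j0 + 1 ≤ m ∧ secondary_structure.toList[m]? = some '>'
     else
      ∃ p < secondary_structure.toList.length, pvFirstGt secondary_structure.toList p ∧
        ∃ m < secondary_structure.toList.length, p + 7 ≤ m ∧ secondary_structure.toList[m]? = some '>')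
  else if interval = -1 then
    (if loop_type = "tLoop" then
      ∃ q < secondary_structure.toList.length, pvLastLt secondary_structure.toList q
     else if loop_type = "vLoop" then
      ∃ q < secondary_structure.toList.length, pvLastLt secondary_structure.toList q ∧ 7 ≤ q ∧
        ∃ j ≤ q - 7, pvFirstB secondary_structure.toList (q - 7) j
     else
      ∃ q < secondary_structure.toList.length, pvLastLt secondary_structure.toList q ∧ 7 ≤ q ∧
        ∃ k ≤ q - 7, secondary_structure.toList[k]? = some '<')
  else True

instance (secondary_structure : String) (loop_type : String) (interval : Int) : Decidable (Pre_find_sequence_end_index secondary_structure loop_type interval) := by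
  unfold Pre_find_sequence_end_index
  have B1 : Decidable (∃ p < secondary_structure.toList.length, pvFirstGt secondary_structure.toList p ∧
      ∃ j0 < secondary_structure.toList.length, pvFirstF secondary_structure.toList (p + 7) j0 ∧
        ∃ j1 < secondary_structure.toList.length, pvFirstF secondary_structure.toList (j0 + 1) j1 ∧
          j1 + 1 < secondary_structure.toList.length) := by
    have I : ∀ p : Nat, Decidable (∃ j0 < secondary_structure.toList.length,
        pvFirstF secondary_structure.toList (p + 7) j0 ∧
          ∃ j1 < secondary_structure.toList.length, pvFirstF secondary_structure.toList (j0 + 1) j1 ∧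
            j1 + 1 < secondary_structure.toList.length) := by
      intro p
      have J : ∀ j0 : Nat, Decidable (∃ j1 < secondary_structure.toList.length,
          pvFirstF secondary_structure.toList (j0 + 1) j1 ∧
            j1 + 1 < secondary_structure.toList.length) := by
        intro j0; infer_instance
      infer_instance
    infer_instance
  have B2 : Decidable (∃ p < secondary_structure.toList.length, pvFirstGt secondary_structure.toList p ∧
      ∃ j0 < secondary_structure.toList.length, pvFirstF secondary_structure.toList (p + 7) j0 ∧
        ∃ m < secondary_structure.toList.length, j0 + 1 ≤ m ∧ secondary_structure.toList[m]? = some '>') := by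
    have I : ∀ p : Nat, Decidable (∃ j0 < secondary_structure.toList.length,
        pvFirstF secondary_structure.toList (p + 7) j0 ∧
          ∃ m < secondary_structure.toList.length, j0 + 1 ≤ m ∧ secondary_structure.toList[m]? = some '>') := by
      intro p
      have J : ∀ j0 : Nat, Decidable (∃ m < secondary_structure.toList.length,
          j0 + 1 ≤ m ∧ secondary_structure.toList[m]? = some '>') := by
        intro j0; infer_instance
      infer_instance
    infer_instance
  have B3 : Decidable (∃ p < secondary_structure.toList.length, pvFirstGt secondary_structure.toList p ∧
      ∃ m < secondary_structure.toList.length, p + 7 ≤ m ∧ secondary_structure.toList[m]? = some '>') := by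
    have I : ∀ p : Nat, Decidable (∃ m < secondary_structure.toList.length,
        p + 7 ≤ m ∧ secondary_structure.toList[m]? = some '>') := by
      intro p; infer_instance
    infer_instance
  have B4 : Decidable (∃ q < secondary_structure.toList.length, pvLastLt secondary_structure.toList q) := by
    infer_instance
  have B5 : Decidable (∃ q < secondary_structure.toList.length, pvLastLt secondary_structure.toList q ∧ 7 ≤ q ∧
      ∃ j ≤ q - 7, pvFirstB secondary_structure.toList (q - 7) j) := by
    have I : ∀ q : Nat, Decidable (∃ j ≤ q - 7, pvFirstB secondary_structure.toList (q - 7) j) := by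
      intro q; infer_instance
    infer_instance
  have B6 : Decidable (∃ q < secondary_structure.toList.length, pvLastLt secondary_structure.toList q ∧ 7 ≤ q ∧
      ∃ k ≤ q - 7, secondary_structure.toList[k]? = some '<') := by
    have I : ∀ q : Nat, Decidable (∃ k ≤ q - 7, secondary_structure.toList[k]? = some '<') := by
      intro q; infer_instance
    infer_instance
  infer_instance

def pvWitness_find_sequence_end_index : String × String × Int := (">......>", "dLoop", 1)

def Spec_find_sequence_end_index (secondary_structure : String) (loop_type : String) (interval : Int) (out : Int) : Prop := out = find_sequence_end_index_alt secondary_structure loop_type interval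
instance (secondary_structure : String) (loop_type : String) (interval : Int) (out : Int) : Decidable (Spec_find_sequence_end_index secondary_structure loop_type interval out) := by unfold Spec_find_sequence_end_index; infer_instance

-- ===== CLAIM (what is proved, stated in full; the proofs are below) =====
def Claim_equal_find_sequence_end_index : Prop := ∀ (secondary_structure : String) (loop_type : String) (interval : Int), Dom_find_sequence_end_index secondary_structure loop_type interval → Pre_find_sequence_end_index secondary_structure loop_type interval → Spec_find_sequence_end_index secondary_structure loop_type interval (find_sequence_end_index secondary_structure loop_type interval)

-- ===== LEMMAS AND PROOFS =====

theorem pvWitness_ok :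
    Dom_find_sequence_end_index (pvWitness_find_sequence_end_index.1) (pvWitness_find_sequence_end_index.2.1) (pvWitness_find_sequence_end_index.2.2) ∧
    Pre_find_sequence_end_index (pvWitness_find_sequence_end_index.1) (pvWitness_find_sequence_end_index.2.1) (pvWitness_find_sequence_end_index.2.2) := by
  decide

theorem pvInRange_nat (t : List Char) (m : Nat) (hm : m < t.length) :
    PySem.Raise.InRange t.length (m : Int) := by
  constructor <;> omega

theorem pvGetD_nat (t : List Char) (m : Nat) (hm : m < t.length) :
    PySem.List.pyGetD t (m : Int) ' ' = t[m] :=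
  PySem.List.pyGetD_eq_getElem t ' ' (by omega) (by omega)

theorem pvLt_of_some {α : Type} (t : List α) (m : Nat) (c : α) (h : t[m]? = some c) : m < t.length :=
  (List.getElem?_eq_some_iff.1 h).1

theorem pvGetElem_of_some {α : Type} (t : List α) (m : Nat) (c : α) (h : t[m]? = some c) : t[m]'(pvLt_of_some t m c h) = c := by
  have := List.getElem?_eq_getElem (pvLt_of_some t m c h)
  rw [this] at h
  exact Option.some.inj h

-- A's initial forward acceptor scan finds the first '>'.
theorem aScanF_eq (t : List Char) (p : Nat) (hfg : pvFirstGt t p) :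
    ∀ (i fuel : Nat), i ≤ p → p - i < fuel → aScanF t fuel (i : Int) = (p : Int) := by
  obtain ⟨hp, hmin⟩ := hfg
  have hplen : p < t.length := pvLt_of_some t p '>' hp
  intro i fuel hi
  induction hd : p - i generalizing i fuel with
  | zero =>
    intro hfu
    obtain ⟨f, rfl⟩ : ∃ f, fuel = f + 1 := ⟨fuel - 1, by omega⟩
    have : i = p := by omega
    subst this
    rw [aScanF, if_pos (pvInRange_nat t i hplen), pvGetD_nat t i hplen,
      if_pos (pvGetElem_of_some t i '>' hp)]
  | succ d ih =>
    intro hfu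
    obtain ⟨f, rfl⟩ : ∃ f, fuel = f + 1 := ⟨fuel - 1, by omega⟩
    have hilen : i < t.length := by omega
    rw [aScanF, if_pos (pvInRange_nat t i hilen), pvGetD_nat t i hilen]
    have hne : t[i] ≠ '>' := by
      intro hcontra
      exact hmin i (by omega) (by rw [List.getElem?_eq_getElem hilen, hcontra])
    rw [if_neg hne]
    rw [show ((i : Int) + 1) = ((i + 1 : Nat) : Int) by push_cast; ring]
    exact ih (i + 1) f (by omega) (by omega) (by omega)

-- A's initial backward acceptor scan finds the last '<'.
theorem aScanB_eq (t : List Char) (q : Nat) (hq : pvLastLt t q) :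
    ∀ (i fuel : Nat), q ≤ i → i < t.length → i - q < fuel → aScanB t fuel (i : Int) = (q : Int) := by
  obtain ⟨hqc, hmax⟩ := hq
  intro i fuel hqi hilen
  induction hd : i - q generalizing i fuel with
  | zero =>
    intro hfu
    obtain ⟨f, rfl⟩ : ∃ f, fuel = f + 1 := ⟨fuel - 1, by omega⟩
    have : i = q := by omega
    subst this
    rw [aScanB, if_pos (pvInRange_nat t i hilen), pvGetD_nat t i hilen,
      if_pos (pvGetElem_of_some t i '<' hqc)]
  | succ d ih =>
    intro hfu
    obtain ⟨f, rfl⟩ : ∃ f, fuel = f + 1 := ⟨fuel - 1, by omega⟩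
    rw [aScanB, if_pos (pvInRange_nat t i hilen), pvGetD_nat t i hilen]
    have hne : t[i] ≠ '<' := by
      intro hcontra
      exact hmax i hilen (by omega) (by rw [List.getElem?_eq_getElem hilen, hcontra])
    rw [if_neg hne]
    rw [show ((i : Int) - 1) = ((i - 1 : Nat) : Int) by omega]
    exact ih (i - 1) f (by omega) (by omega) (by omega) (by omega)

-- singleton prefix of a drop
theorem pfx_singleton (t : List Char) (c : Char) (m : Nat) :
    [c] <+: t.drop m ↔ t[m]? = some c := by
  rw [← List.head?_drop]
  cases hdrop : t.drop m with
  | nil => simp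
  | cons x xs => simp [List.cons_prefix_cons, eq_comm]

-- Python's str.find for a single character, pinned by a first-occurrence witness.
theorem char_find_eq (t : List Char) (c : Char) (p : Nat)
    (hc : t[p]? = some c) (hmin : ∀ k, k < p → t[k]? ≠ some c) :
    PySem.Chars.find t [c] = (p : Int) := by
  have hplen : p < t.length := pvLt_of_some t p c hc
  have hmem : c ∈ t := by
    have := List.getElem?_eq_some_iff.1 hc
    obtain ⟨h1, h2⟩ := this
    exact h2 ▸ List.getElem_mem h1
  have hinfix : [c] <:+: t := by
    obtain ⟨s, u, hsu⟩ := List.mem_iff_append.1 hmem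
    exact ⟨s, u, by simp [hsu]⟩
  have hne : PySem.Chars.find t [c] ≠ -1 := by
    rw [ne_eq, PySem.Chars.find_eq_neg_one_iff]
    simpa using hinfix
  have h0 : 0 ≤ PySem.Chars.find t [c] := by
    have := PySem.Chars.neg_one_le_find t [c]
    omega
  obtain ⟨hpfx, hlow⟩ := PySem.Chars.find_spec (s := t) (sub := [c]) h0
  have hat : t[(PySem.Chars.find t [c]).toNat]? = some c := (pfx_singleton t c _).1 hpfx
  have hge : p ≤ (PySem.Chars.find t [c]).toNat := by
    by_contra hlt
    exact hmin _ (by omega) hat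
  have hle : (PySem.Chars.find t [c]).toNat ≤ p := by
    by_contra hlt
    exact hlow p (by omega) ((pfx_singleton t c p).2 hc)
  omega

-- Python's str.rfind for a single character, pinned by a last-occurrence witness.
theorem char_rfind_go_eq (t : List Char) (c : Char) (q : Nat)
    (hc : t[q]? = some c) (hmax : ∀ k, k < t.length → q < k → t[k]? ≠ some c) :
    ∀ m : Nat, q ≤ m → m ≤ t.length → PySem.Chars.rfind.go t [c] m = (q : Int) := by
  have hqlen : q < t.length := pvLt_of_some t q c hc
  intro m
  induction m with
  | zero =>
    intro hq0 _
    have : q = 0 := by omega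
    subst this
    have hpfx : [c] <+: t := by
      have := (pfx_singleton t c 0).2 hc
      simpa using this
    have hred : PySem.Chars.rfind.go t [c] 0 = if [c].isPrefixOf t = true then (0 : Int) else -1 := rfl
    rw [hred, if_pos (List.isPrefixOf_iff_prefix.2 hpfx)]
    rfl
  | succ m ih =>
    intro hqm hmlen
    have hred : PySem.Chars.rfind.go t [c] (m + 1) =
        if [c].isPrefixOf (List.drop (m + 1) t) = true then ((m + 1 : Nat) : Int)
        else PySem.Chars.rfind.go t [c] m := rfl
    rw [hred]
    by_cases hq : q = m + 1
    · subst hq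
      rw [if_pos (List.isPrefixOf_iff_prefix.2 ((pfx_singleton t c (m + 1)).2 hc))]
    · rw [if_neg]
      · exact ih (by omega) (by omega)
      · rw [List.isPrefixOf_iff_prefix, pfx_singleton]
        by_cases hlen : m + 1 < t.length
        · exact hmax (m + 1) hlen (by omega)
        · have hnone : t[m+1]? = none := by
            rw [List.getElem?_eq_none_iff]; omega
          simp [hnone]

theorem char_rfind_eq (t : List Char) (c : Char) (q : Nat)
    (hc : t[q]? = some c) (hmax : ∀ k, k < t.length → q < k → t[k]? ≠ some c) :
    PySem.Chars.rfind t [c] = (q : Int) := by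
  have hqlen : q < t.length := pvLt_of_some t q c hc
  unfold PySem.Chars.rfind
  exact char_rfind_go_eq t c q hc hmax t.length (by omega) le_rfl

-- balance bookkeeping
def pvBalI (l : List Char) : Int := (l.count '>' : Int) - (l.count '<' : Int)
def pvPre (t : List Char) (i m : Nat) : List Char := (t.drop i).take (m - i)

theorem pvPre_self (t : List Char) (i : Nat) : pvPre t i i = [] := by simp [pvPre]

theorem pvSeg_cons (t : List Char) (m i0 : Nat) (hmi : m ≤ i0) (hm : m < t.length) :
    pvSeg t m i0 = t[m] :: pvSeg t (m + 1) i0 := by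
  unfold pvSeg
  rw [List.drop_eq_getElem_cons hm, show i0 + 1 - m = (i0 - m) + 1 by omega,
    List.take_succ_cons, show i0 + 1 - (m + 1) = i0 - m by omega]

theorem pvBalI_cons (l : List Char) (c : Char) :
    pvBalI (c :: l) = pvBalI l + (if c = '>' then 1 else 0) - (if c = '<' then 1 else 0) := by
  by_cases h1 : c = '>'
  · subst h1; simp [pvBalI]; omega
  · by_cases h2 : c = '<'
    · subst h2; simp [pvBalI, h1]; omega
    · simp [pvBalI, h1, h2]

theorem pvBalI_append (l m : List Char) : pvBalI (l ++ m) = pvBalI l + pvBalI m := by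
  simp [pvBalI, List.count_append]
  ring

theorem stopF_iff (t : List Char) (i0 m : Nat) (him : i0 ≤ m) (hm : m < t.length) :
    pvStopF t i0 m ↔ (pvBalI (pvPre t i0 (m + 1)) = 0 ∧ '>' ∈ pvPre t i0 (m + 1)) := by
  have hseg : pvSeg t i0 m = pvPre t i0 (m + 1) := rfl
  unfold pvStopF
  rw [hseg]
  unfold pvBalI
  constructor
  · rintro ⟨-, -, h1, h2⟩; exact ⟨by omega, h2⟩
  · rintro ⟨h1, h2⟩; exact ⟨him, hm, by omega, h2⟩

theorem stopB_iff (t : List Char) (m i0 : Nat) (hmi : m ≤ i0) (hm : i0 < t.length) :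
    pvStopB t m i0 ↔ (pvBalI (pvSeg t m i0) = 0 ∧ '<' ∈ pvSeg t m i0) := by
  unfold pvStopB pvBalI
  constructor
  · rintro ⟨-, -, h1, h2⟩; exact ⟨by omega, h2⟩
  · rintro ⟨h1, h2⟩; exact ⟨hmi, hm, by omega, h2⟩

-- prefix-table values: balance and '>'-count of t.take k
def pvPB (t : List Char) (k : Nat) : Int := pvBalI (t.take k)
def pvPG (t : List Char) (k : Nat) : Int := ((t.take k).count '>' : Int)

-- the table B builds holds exactly those prefix values
theorem bScan_length (t : List Char) : ∀ (b g : Int), (bScan b g t).length = t.length + 1 := by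
  induction t with
  | nil => intro b g; rfl
  | cons c cs ih => intro b g; simp [bScan, ih]

theorem bScan_get (t : List Char) : ∀ (k : Nat) (b g : Int), k ≤ t.length →
    (bScan b g t)[k]? = some (b + pvPB t k, g + pvPG t k) := by
  induction t with
  | nil =>
    intro k b g hk
    have : k = 0 := by simpa using hk
    subst this
    simp [bScan, pvPB, pvPG, pvBalI]
  | cons c cs ih =>
    intro k b g hk
    cases k with
    | zero => simp [bScan, pvPB, pvPG, pvBalI]
    | succ k =>
      have h1 : (bScan b g (c :: cs))[k + 1]? =
          (bScan (b + (if c = '>' then 1 else 0) - (if c = '<' then 1 else 0))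
            (g + (if c = '>' then 1 else 0)) cs)[k]? := by
        simp [bScan]
      rw [h1, ih k _ _ (by simpa using hk)]
      have hb : pvPB (c :: cs) (k + 1) =
          pvPB cs k + (if c = '>' then 1 else 0) - (if c = '<' then 1 else 0) := by
        simp only [pvPB, List.take_succ_cons]
        rw [pvBalI_cons]
      have hg : pvPG (c :: cs) (k + 1) = pvPG cs k + (if c = '>' then 1 else 0) := by
        simp only [pvPG, List.take_succ_cons, List.count_cons]
        by_cases h : c = '>'
        · simp [h]
        · simp [h]
      rw [hb, hg]
      congr 2 <;> ring

-- splitting a prefix at an interior point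
theorem take_split (t : List Char) (i j : Nat) (h : i ≤ j + 1) :
    t.take (j + 1) = t.take i ++ pvSeg t i j := by
  rw [show j + 1 = i + (j + 1 - i) by omega, List.take_add]
  rfl

theorem pvPB_split (t : List Char) (i j : Nat) (h : i ≤ j + 1) :
    pvPB t (j + 1) = pvPB t i + pvBalI (pvSeg t i j) := by
  rw [pvPB, take_split t i j h, pvBalI_append]
  rfl

theorem pvPG_split (t : List Char) (i j : Nat) (h : i ≤ j + 1) :
    pvPG t (j + 1) = pvPG t i + ((pvSeg t i j).count '>' : Int) := by
  rw [pvPG, take_split t i j h]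
  simp [pvPG, List.count_append]

theorem pvPL_split (t : List Char) (i j : Nat) (h : i ≤ j + 1) :
    pvPG t (j + 1) - pvPB t (j + 1) = (pvPG t i - pvPB t i) + ((pvSeg t i j).count '<' : Int) := by
  have hb := pvPB_split t i j h
  have hg := pvPG_split t i j h
  have : pvBalI (pvSeg t i j) = ((pvSeg t i j).count '>' : Int) - ((pvSeg t i j).count '<' : Int) := rfl
  rw [hb, hg, this]
  ring

-- B's forward acceptance test at j, in prefix-table terms, is exactly pvStopF
theorem condF_iff (t : List Char) (i0 m : Nat) (him : i0 ≤ m) (hm : m < t.length) :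
    (pvPB t (m + 1) = pvPB t i0 ∧ pvPG t i0 < pvPG t (m + 1)) ↔ pvStopF t i0 m := by
  rw [stopF_iff t i0 m him hm]
  have hseg : pvPre t i0 (m + 1) = pvSeg t i0 m := rfl
  rw [hseg, pvPB_split t i0 m (by omega), pvPG_split t i0 m (by omega)]
  have hmem : '>' ∈ pvSeg t i0 m ↔ 0 < (pvSeg t i0 m).count '>' := by
    rw [List.count_pos_iff]
  rw [hmem]
  constructor
  · rintro ⟨h1, h2⟩; constructor <;> omega
  · rintro ⟨h1, h2⟩; constructor <;> omega

-- B's backward acceptance test at m, in prefix-table terms, is exactly pvStopB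
theorem condB_iff (t : List Char) (i0 m : Nat) (hmi : m ≤ i0) (hi0 : i0 < t.length) :
    (pvPB t m = pvPB t (i0 + 1) ∧ pvPG t m - pvPB t m < pvPG t (i0 + 1) - pvPB t (i0 + 1)) ↔ pvStopB t m i0 := by
  rw [stopB_iff t m i0 hmi hi0]
  rw [pvPL_split t m i0 (by omega), pvPB_split t m i0 (by omega)]
  have hmem : '<' ∈ pvSeg t m i0 ↔ 0 < (pvSeg t m i0).count '<' := by
    rw [List.count_pos_iff]
  rw [hmem]
  constructor
  · rintro ⟨h1, h2⟩; constructor <;> omega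
  · rintro ⟨h1, h2⟩; constructor <;> omega

-- table lookup at a Nat index
theorem bScan_pyGet (t : List Char) (k : Nat) (hk : k ≤ t.length) :
    PySem.List.pyGet? (bScan 0 0 t) (k : Int) = some (pvPB t k, pvPG t k) := by
  have hlen : k < (bScan 0 0 t).length := by rw [bScan_length]; omega
  rw [PySem.List.pyGet?_ofNat (bScan 0 0 t) k hlen]
  have := bScan_get t k 0 0 hk
  rw [List.getElem?_eq_getElem hlen] at this
  have := Option.some.inj this
  rw [this]
  simp

-- one step of B's prefix-table searches, with both lookups resolved
theorem bStemEndF_step (pre : List (Int × Int)) (i j : Int) (rest : List Int) (p q : Int × Int)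
    (hp : PySem.List.pyGet? pre (j + 1) = some p) (hq : PySem.List.pyGet? pre i = some q) :
    bStemEndF pre i (j :: rest) = if p.1 = q.1 ∧ q.2 < p.2 then j else bStemEndF pre i rest := by
  rw [bStemEndF, hp, hq]

theorem bStemEndB_step (pre : List (Int × Int)) (i j : Int) (rest : List Int) (p q : Int × Int)
    (hp : PySem.List.pyGet? pre j = some p) (hq : PySem.List.pyGet? pre (i + 1) = some q) :
    bStemEndB pre i (j :: rest) = if p.1 = q.1 ∧ p.2 - p.1 < q.2 - q.1 then j else bStemEndB pre i rest := by
  rw [bStemEndB, hp, hq]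

-- B's forward prefix-table search returns the pinned first stem end
theorem bStemEndF_eq (t : List Char) (i0 j0 : Nat) (hj : pvFirstF t i0 j0) :
    ∀ d m, i0 ≤ m → m ≤ j0 → j0 - m = d →
      bStemEndF (bScan 0 0 t) (i0 : Int) (PySem.List.pyRange (m : Int) (t.length : Int) 1) = (j0 : Int) := by
  obtain ⟨hstop0, hmin⟩ := hj
  have hj0len : j0 < t.length := hstop0.2.1
  have hi0len : i0 ≤ t.length := by omega
  intro d
  induction d with
  | zero =>
    intro m him hmj hd
    have hm : m = j0 := by omega
    subst hm
    have hp : PySem.List.pyGet? (bScan 0 0 t) ((m : Int) + 1) = some (pvPB t (m + 1), pvPG t (m + 1)) := by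
      rw [show (m : Int) + 1 = ((m + 1 : Nat) : Int) by push_cast; ring]
      exact bScan_pyGet t (m + 1) (by omega)
    rw [PySem.List.pyRange_one_cons (by exact_mod_cast hj0len),
      bStemEndF_step _ _ _ _ _ _ hp (bScan_pyGet t i0 hi0len)]
    rw [if_pos (by exact (condF_iff t i0 m him (by omega)).2 hstop0)]
  | succ d ih =>
    intro m him hmj hd
    have hmlen : m < t.length := by omega
    have hp : PySem.List.pyGet? (bScan 0 0 t) ((m : Int) + 1) = some (pvPB t (m + 1), pvPG t (m + 1)) := by
      rw [show (m : Int) + 1 = ((m + 1 : Nat) : Int) by push_cast; ring]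
      exact bScan_pyGet t (m + 1) (by omega)
    rw [PySem.List.pyRange_one_cons (by exact_mod_cast hmlen),
      bStemEndF_step _ _ _ _ _ _ hp (bScan_pyGet t i0 hi0len)]
    rw [if_neg (by
      intro hcond
      exact hmin m (by omega) ((condF_iff t i0 m him hmlen).1 hcond))]
    rw [show (m : Int) + 1 = ((m + 1 : Nat) : Int) by push_cast; ring]
    exact ih (m + 1) (by omega) (by omega) (by omega)

-- B's backward prefix-table search returns the pinned first (largest) stem start
theorem bStemEndB_eq (t : List Char) (i0 j : Nat) (hi0 : i0 < t.length) (hj : pvFirstB t i0 j) :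
    ∀ d m, j ≤ m → m ≤ i0 → m - j = d →
      bStemEndB (bScan 0 0 t) (i0 : Int) (PySem.List.pyRange (m : Int) (-1) (-1)) = (j : Int) := by
  obtain ⟨hstop0, hmax⟩ := hj
  have hi1len : i0 + 1 ≤ t.length := by omega
  intro d
  induction d with
  | zero =>
    intro m hjm hmi hd
    have hm : m = j := by omega
    subst hm
    have hq : PySem.List.pyGet? (bScan 0 0 t) ((i0 : Int) + 1) = some (pvPB t (i0 + 1), pvPG t (i0 + 1)) := by
      rw [show (i0 : Int) + 1 = ((i0 + 1 : Nat) : Int) by push_cast; ring]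
      exact bScan_pyGet t (i0 + 1) hi1len
    rw [PySem.List.pyRange_neg_one_cons (by omega),
      bStemEndB_step _ _ _ _ _ _ (bScan_pyGet t m (by omega)) hq]
    rw [if_pos (by exact (condB_iff t i0 m hmi hi0).2 hstop0)]
  | succ d ih =>
    intro m hjm hmi hd
    have hq : PySem.List.pyGet? (bScan 0 0 t) ((i0 : Int) + 1) = some (pvPB t (i0 + 1), pvPG t (i0 + 1)) := by
      rw [show (i0 : Int) + 1 = ((i0 + 1 : Nat) : Int) by push_cast; ring]
      exact bScan_pyGet t (i0 + 1) hi1len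
    rw [PySem.List.pyRange_neg_one_cons (by omega),
      bStemEndB_step _ _ _ _ _ _ (bScan_pyGet t m (by omega)) hq]
    rw [if_neg (by
      intro hcond
      exact hmax m hmi (by omega) ((condB_iff t i0 m hmi hi0).1 hcond))]
    rw [show (m : Int) - 1 = ((m - 1 : Nat) : Int) by omega]
    exact ih (m - 1) (by omega) (by omega) (by omega)

-- A's forward stem loop state, phrased through the segment it has consumed
theorem pvPre_succ (t : List Char) (i m : Nat) (him : i ≤ m) (hm : m < t.length) :
    pvPre t i (m + 1) = pvPre t i m ++ [t[m]] := by
  unfold pvPre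
  rw [show m + 1 - i = (m - i) + 1 by omega, List.take_add_one]
  congr 1
  rw [List.getElem?_drop]
  rw [show i + (m - i) = m by omega, List.getElem?_eq_getElem hm]
  rfl

theorem pvBalI_snoc (l : List Char) (c : Char) :
    pvBalI (l ++ [c]) = pvBalI l + (if c = '>' then 1 else 0) - (if c = '<' then 1 else 0) := by
  by_cases h1 : c = '>'
  · subst h1; simp [pvBalI]; omega
  · by_cases h2 : c = '<'
    · subst h2; simp [pvBalI, h1]; omega
    · simp [pvBalI, h1, h2]

-- one read of A's forward stem loop
theorem stemF_cellA (t : List Char) (i0 m : Nat) (him : i0 ≤ m) (hm : m < t.length)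
    (bal : Int) (seen : Bool) (hbal : bal = pvBalI (pvPre t i0 m))
    (hseen : seen = true ↔ '>' ∈ pvPre t i0 m) (fuel : Nat) (req counter : Int) (hcr : counter < req) :
    aStemF t (fuel + 1) req counter bal (!seen) (m : Int) =
      if pvStopF t i0 m then aStemF t fuel req (counter + 1) 0 true ((m : Int) + 1)
      else aStemF t fuel req counter (pvBalI (pvPre t i0 (m + 1)))
        (!(decide ('>' ∈ pvPre t i0 (m + 1)))) ((m : Int) + 1) := by
  rw [aStemF, if_pos hcr]
  simp only [if_pos (pvInRange_nat t m hm), pvGetD_nat t m hm]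
  have hbal' : (if t[m] = '>' then bal + 1 else if t[m] = '<' then bal - 1 else bal)
      = pvBalI (pvPre t i0 (m + 1)) := by
    rw [pvPre_succ t i0 m him hm, pvBalI_snoc, hbal]
    by_cases h1 : t[m] = '>'
    · simp [h1]
    · by_cases h2 : t[m] = '<' <;> simp [h1, h2]
  have hseen' : (if t[m] = '>' then false else !seen)
      = !(decide ('>' ∈ pvPre t i0 (m + 1))) := by
    rw [pvPre_succ t i0 m him hm]
    by_cases h1 : t[m] = '>'
    · simp [h1]
    · simp [h1, Ne.symm h1]
      cases seen <;> simp_all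
  simp only [hbal', hseen']
  by_cases hstop : pvStopF t i0 m
  · have hcond : pvBalI (pvPre t i0 (m + 1)) = 0 ∧ '>' ∈ pvPre t i0 (m + 1) :=
      (stopF_iff t i0 m him hm).1 hstop
    rw [if_pos ⟨hcond.1, by simp [hcond.2]⟩, if_pos hstop, hcond.1]
  · have hcond := (stopF_iff t i0 m him hm).not.1 hstop
    rw [if_neg (by rw [not_and_or] at hcond ⊢; rcases hcond with h | h; exact Or.inl h; exact Or.inr (by simpa using h)), if_neg hstop]

-- A's forward stem loop consumes one pinned stem and bumps its counter
theorem stemF_runA (t : List Char) (i0 j0 : Nat) (hj : pvFirstF t i0 j0)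
    (req counter : Int) (hcr : counter < req) :
    ∀ d m (fuel : Nat), i0 ≤ m → m ≤ j0 → j0 - m = d → d < fuel →
    ∀ (bal : Int) (seen : Bool), bal = pvBalI (pvPre t i0 m) → (seen = true ↔ '>' ∈ pvPre t i0 m) →
      aStemF t fuel req counter bal (!seen) (m : Int) =
        aStemF t (fuel - (j0 - m) - 1) req (counter + 1) 0 true ((j0 : Int) + 1) := by
  obtain ⟨hstop0, hmin⟩ := hj
  have hj0len : j0 < t.length := hstop0.2.1
  intro d
  induction d with
  | zero =>
    intro m fuel him hmj hd hfu bal seen hbal hseen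
    obtain ⟨f, rfl⟩ : ∃ f, fuel = f + 1 := ⟨fuel - 1, by omega⟩
    have hm : m = j0 := by omega
    subst hm
    rw [stemF_cellA t i0 m him (by omega) bal seen hbal hseen f req counter hcr, if_pos hstop0]
    congr 1
    omega
  | succ d ih =>
    intro m fuel him hmj hd hfu bal seen hbal hseen
    obtain ⟨f, rfl⟩ : ∃ f, fuel = f + 1 := ⟨fuel - 1, by omega⟩
    rw [stemF_cellA t i0 m him (by omega) bal seen hbal hseen f req counter hcr,
      if_neg (hmin m (by omega))]
    rw [show (m : Int) + 1 = ((m + 1 : Nat) : Int) by push_cast; ring]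
    rw [ih (m + 1) f (by omega) (by omega) (by omega) (by omega) _ _ rfl (by simp)]
    congr 1
    omega

-- single remaining required stem: A's loop exits right after the pinned stop
theorem stemF_oneA (t : List Char) (i0 j0 : Nat) (hj : pvFirstF t i0 j0)
    (fuel : Nat) (hfu : j0 - i0 < fuel) (req counter : Int) (hcr : counter < req)
    (hreq : counter + 1 = req) :
    aStemF t fuel req counter 0 true (i0 : Int) = (j0 : Int) + 1 := by
  have h := stemF_runA t i0 j0 hj req counter hcr (j0 - i0) i0 fuel le_rfl hj.1.1 rfl hfu
    0 false (by simp [pvPre_self, pvBalI]) (by simp [pvPre_self])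
  simp only [Bool.not_false] at h
  rw [h, hreq, aStemF.eq_def, if_neg (lt_irrefl req)]

-- one read of A's backward stem loop
theorem stemB_cellA (t : List Char) (i0 m : Nat) (hmi : m ≤ i0) (hi0 : i0 < t.length)
    (bal : Int) (seen : Bool) (hbal : bal = pvBalI (pvSeg t (m + 1) i0))
    (hseen : seen = true ↔ '<' ∈ pvSeg t (m + 1) i0) (fuel : Nat) (req counter : Int) (hcr : counter < req) :
    aStemB t (fuel + 1) req counter bal (!seen) (m : Int) =
      if pvStopB t m i0 then aStemB t fuel req (counter + 1) 0 true ((m : Int) - 1)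
      else aStemB t fuel req counter (pvBalI (pvSeg t m i0))
        (!(decide ('<' ∈ pvSeg t m i0))) ((m : Int) - 1) := by
  have hm : m < t.length := by omega
  rw [aStemB, if_pos hcr]
  simp only [if_pos (pvInRange_nat t m hm), pvGetD_nat t m hm]
  have hcons := pvSeg_cons t m i0 hmi hm
  have hbal' : (if t[m] = '>' then bal + 1 else if t[m] = '<' then bal - 1 else bal)
      = pvBalI (pvSeg t m i0) := by
    rw [hcons, pvBalI_cons, hbal]
    by_cases h1 : t[m] = '>'
    · simp [h1]
    · by_cases h2 : t[m] = '<' <;> simp [h1, h2]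
  have hseen' : (if t[m] = '<' then false else !seen)
      = !(decide ('<' ∈ pvSeg t m i0)) := by
    rw [hcons]
    by_cases h1 : t[m] = '<'
    · simp [h1]
    · simp [h1, Ne.symm h1]
      cases seen <;> simp_all
  simp only [hbal', hseen']
  by_cases hstop : pvStopB t m i0
  · have hcond := (stopB_iff t m i0 hmi hi0).1 hstop
    rw [if_pos ⟨hcond.1, by simp [hcond.2]⟩, if_pos hstop, hcond.1]
  · have hcond := (stopB_iff t m i0 hmi hi0).not.1 hstop
    rw [if_neg (by rw [not_and_or] at hcond ⊢; rcases hcond with h | h; exact Or.inl h; exact Or.inr (by simpa using h)), if_neg hstop]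

-- A's backward stem loop (vLoop), pinned by the first stop scanning down.
theorem stemB_runA (t : List Char) (i0 j : Nat) (hi0 : i0 < t.length) (hj : pvFirstB t i0 j) :
    ∀ d m (fuel : Nat), j ≤ m → m ≤ i0 → m - j = d → d + 1 < fuel →
    ∀ (bal : Int) (seen : Bool), bal = pvBalI (pvSeg t (m + 1) i0) → (seen = true ↔ '<' ∈ pvSeg t (m + 1) i0) →
      aStemB t fuel 1 0 bal (!seen) (m : Int) = (j : Int) - 1 := by
  obtain ⟨hstop0, hmax⟩ := hj
  intro d
  induction d with
  | zero =>
    intro m fuel hjm hmi hd hfu bal seen hbal hseen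
    obtain ⟨f, rfl⟩ : ∃ f, fuel = f + 1 := ⟨fuel - 1, by omega⟩
    have hm : m = j := by omega
    subst hm
    rw [stemB_cellA t i0 m hmi hi0 bal seen hbal hseen f 1 0 (by norm_num), if_pos hstop0]
    rw [aStemB.eq_def, if_neg (by norm_num)]
  | succ d ih =>
    intro m fuel hjm hmi hd hfu bal seen hbal hseen
    obtain ⟨f, rfl⟩ : ∃ f, fuel = f + 1 := ⟨fuel - 1, by omega⟩
    rw [stemB_cellA t i0 m hmi hi0 bal seen hbal hseen f 1 0 (by norm_num),
      if_neg (hmax m hmi (by omega))]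
    rw [show (m : Int) - 1 = ((m - 1 : Nat) : Int) by omega]
    have hnm : pvSeg t m i0 = pvSeg t ((m - 1) + 1) i0 := by rw [show (m - 1) + 1 = m by omega]
    exact ih (m - 1) f (by omega) (by omega) (by omega) (by omega) _ _ (by rw [← hnm]) (by rw [← hnm]; simp)

-- A's trailing forward scan to the next '>' (loop_type ≠ 'vLoop').
theorem aScan2F_eq (t : List Char) (lt : String) (hlt : lt ≠ "vLoop") (m1 : Nat)
    (hc : t[m1]? = some '>') :
    ∀ (i fuel : Nat), i ≤ m1 → m1 - i < fuel → (∀ k, i ≤ k → k < m1 → t[k]? ≠ some '>') →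
      aScan2F t fuel lt (i : Int) = (m1 : Int) := by
  have hm1len : m1 < t.length := pvLt_of_some t m1 '>' hc
  intro i fuel hi
  induction hd : m1 - i generalizing i fuel with
  | zero =>
    intro hfu _
    obtain ⟨f, rfl⟩ : ∃ f, fuel = f + 1 := ⟨fuel - 1, by omega⟩
    have : i = m1 := by omega
    subst this
    rw [aScan2F, if_pos (pvInRange_nat t i hm1len), pvGetD_nat t i hm1len]
    rw [if_neg (by push Not; intro hne; exact absurd (pvGetElem_of_some t i '>' hc) hne)]
  | succ d ih =>
    intro hfu hmin
    obtain ⟨f, rfl⟩ : ∃ f, fuel = f + 1 := ⟨fuel - 1, by omega⟩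
    have hilen : i < t.length := by omega
    rw [aScan2F, if_pos (pvInRange_nat t i hilen), pvGetD_nat t i hilen]
    have hne : t[i] ≠ '>' := by
      intro hcontra
      exact hmin i le_rfl (by omega) (by rw [List.getElem?_eq_getElem hilen, hcontra])
    rw [if_pos ⟨hne, hlt⟩]
    rw [show (i : Int) + 1 = ((i + 1 : Nat) : Int) by push_cast; ring]
    exact ih (i + 1) f (by omega) (by omega) (by omega) (fun k hk1 hk2 => hmin k (by omega) hk2)

-- A's trailing backward scan to the previous '<' (loop_type ≠ 'vLoop').
theorem aScan2B_eq (t : List Char) (lt : String) (hlt : lt ≠ "vLoop") (k1 : Nat)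
    (hc : t[k1]? = some '<') :
    ∀ (i fuel : Nat), k1 ≤ i → i < t.length → i - k1 < fuel → (∀ k, k ≤ i → k1 < k → t[k]? ≠ some '<') →
      aScan2B t fuel lt (i : Int) = (k1 : Int) := by
  intro i fuel hk1i hilen
  induction hd : i - k1 generalizing i fuel with
  | zero =>
    intro hfu _
    obtain ⟨f, rfl⟩ : ∃ f, fuel = f + 1 := ⟨fuel - 1, by omega⟩
    have : i = k1 := by omega
    subst this
    rw [aScan2B, if_pos (pvInRange_nat t i hilen), pvGetD_nat t i hilen]
    rw [if_neg (by push Not; intro hne; exact absurd (pvGetElem_of_some t i '<' hc) hne)]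
  | succ d ih =>
    intro hfu hmax
    obtain ⟨f, rfl⟩ : ∃ f, fuel = f + 1 := ⟨fuel - 1, by omega⟩
    rw [aScan2B, if_pos (pvInRange_nat t i hilen), pvGetD_nat t i hilen]
    have hne : t[i] ≠ '<' := by
      intro hcontra
      exact hmax i le_rfl (by omega) (by rw [List.getElem?_eq_getElem hilen, hcontra])
    rw [if_pos ⟨hne, hlt⟩]
    rw [show (i : Int) - 1 = ((i - 1 : Nat) : Int) by omega]
    exact ih (i - 1) f (by omega) (by omega) (by omega) (by omega) (fun k hk1 hk2 => hmax k (by omega) hk2)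

-- B's generator search for the previous '<', same pin.
theorem bNextLt_eq (t : List Char) (k1 : Nat) (hc : t[k1]? = some '<') :
    ∀ i : Nat, k1 ≤ i → i < t.length → (∀ k, k ≤ i → k1 < k → t[k]? ≠ some '<') →
      bNextLt t (PySem.List.pyRange (i : Int) (-1) (-1)) = (k1 : Int) := by
  intro i hk1i hilen
  induction hd : i - k1 generalizing i with
  | zero =>
    intro _
    have : i = k1 := by omega
    subst this
    rw [PySem.List.pyRange_neg_one_cons (by omega), bNextLt,
      PySem.List.pyGet?_ofNat t i hilen]
    simp [pvGetElem_of_some t i '<' hc]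
  | succ d ih =>
    intro hmax
    rw [PySem.List.pyRange_neg_one_cons (by omega), bNextLt,
      PySem.List.pyGet?_ofNat t i hilen]
    have hne : t[i] ≠ '<' := by
      intro hcontra
      exact hmax i le_rfl (by omega) (by rw [List.getElem?_eq_getElem hilen, hcontra])
    simp only [hne, if_false]
    rw [show (i : Int) - 1 = ((i - 1 : Nat) : Int) by omega]
    exact ih (i - 1) (by omega) (by omega) (by omega) (fun k hk1 hk2 => hmax k (by omega) hk2)

-- the trailing forward scan agrees with B's s.index('>', i)
theorem trailF (t : List Char) (lt : String) (hlt : lt ≠ "vLoop") (i m fuel : Nat)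
    (hfu : t.length ≤ fuel) (him : i ≤ m) (hmc : t[m]? = some '>') :
    aScan2F t fuel lt (i : Int) = PySem.Chars.findFrom t ['>'] (i : Int) none ∧
      0 ≤ PySem.Chars.findFrom t ['>'] (i : Int) none := by
  have hex : ∃ k, i ≤ k ∧ t[k]? = some '>' := ⟨m, him, hmc⟩
  set m1 := Nat.find hex with hm1def
  obtain ⟨hm1i, hm1c⟩ := Nat.find_spec hex
  have hm1len : m1 < t.length := pvLt_of_some t m1 '>' hm1c
  have hmin : ∀ k, i ≤ k → k < m1 → t[k]? ≠ some '>' :=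
    fun k hk1 hk2 hkc => Nat.find_min hex hk2 ⟨hk1, hkc⟩
  have hA : aScan2F t fuel lt (i : Int) = (m1 : Int) :=
    aScan2F_eq t lt hlt m1 hm1c i fuel hm1i (by omega) hmin
  have hdrop : PySem.Chars.find (t.drop i) ['>'] = ((m1 - i : Nat) : Int) := by
    apply char_find_eq
    · rw [List.getElem?_drop, show i + (m1 - i) = m1 by omega]
      exact hm1c
    · intro k hk
      rw [List.getElem?_drop]
      exact hmin (i + k) (by omega) (by omega)
  have hff : PySem.Chars.findFrom t ['>'] (i : Int) none = (m1 : Int) := by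
    rw [PySem.Chars.findFrom_natCast t ['>'] i (by omega), hdrop]
    rw [if_neg (by omega)]
    omega
  rw [hff, hA]
  exact ⟨rfl, by omega⟩

-- the trailing backward scan agrees with B's generator search
theorem trailB (t : List Char) (lt : String) (hlt : lt ≠ "vLoop") (i k fuel : Nat)
    (hfu : t.length ≤ fuel) (hin : i < t.length) (hk : k ≤ i) (hkc : t[k]? = some '<') :
    aScan2B t fuel lt (i : Int) = bNextLt t (PySem.List.pyRange (i : Int) (-1) (-1)) := by
  set k1 := Nat.findGreatest (fun j => t[j]? = some '<') i with hk1def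
  have hk1c : t[k1]? = some '<' := Nat.findGreatest_spec (P := fun j => t[j]? = some '<') hk hkc
  have hk1i : k1 ≤ i := Nat.findGreatest_le i
  have hmax : ∀ j, j ≤ i → k1 < j → t[j]? ≠ some '<' :=
    fun j hj1 hj2 => Nat.findGreatest_is_greatest hj2 hj1
  rw [aScan2B_eq t lt hlt k1 hk1c i fuel hk1i hin (by omega) hmax,
    bNextLt_eq t k1 hk1c i hk1i hin hmax]

-- for loop_type = 'vLoop' the trailing scans read one cell and stop
theorem aScan2F_vLoop (t : List Char) (fuel : Nat) (lt : String) (hlt : lt = "vLoop") (i : Int)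
    (hin : PySem.Raise.InRange t.length i) :
    aScan2F t (fuel + 1) lt i = i := by
  rw [aScan2F, if_pos hin, if_neg (fun hcontra => hcontra.2 hlt)]

theorem aScan2B_vLoop (t : List Char) (fuel : Nat) (lt : String) (hlt : lt = "vLoop") (i : Int)
    (hin : PySem.Raise.InRange t.length i) :
    aScan2B t (fuel + 1) lt i = i := by
  rw [aScan2B, if_pos hin, if_neg (fun hcontra => hcontra.2 hlt)]

-- ===== VERDICT (by name: the statement is the Claim_ definition above) =====
theorem find_sequence_end_index_spec : Claim_equal_find_sequence_end_index := by
  intro s lt interval _hdom hpre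
  show find_sequence_end_index s lt interval = find_sequence_end_index_alt s lt interval
  by_cases h1 : interval = 1
  · -- forward direction
    rw [Pre_find_sequence_end_index, if_pos h1] at hpre
    simp only [find_sequence_end_index, find_sequence_end_index_alt]
    rw [if_pos h1, if_pos h1]
    by_cases hv : lt = "vLoop"
    · rw [if_pos hv] at hpre
      obtain ⟨p, hpn, hfg, j0, hj0n, hj0, j1, hj1n, hj1, hj1lt⟩ := hpre
      have hacc : aScanF s.toList (s.toList.length + 2) 0 = (p : Int) := by
        simpa using aScanF_eq s.toList p hfg 0 (s.toList.length + 2) (Nat.zero_le p) (by omega)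
      have hfind : PySem.Chars.find s.toList ['>'] = (p : Int) :=
        char_find_eq s.toList '>' p hfg.1 hfg.2
      rw [if_pos hv, if_pos hv, hacc, hfind, if_neg (by omega)]
      rw [show List.range 2 = [0, 1] from rfl, List.foldl_cons, List.foldl_cons, List.foldl_nil]
      have hp7j0 : p + 7 ≤ j0 := hj0.1.1
      have e1 := stemF_runA s.toList (p + 7) j0 hj0 2 0 (by norm_num) (j0 - (p + 7)) (p + 7)
        (s.toList.length + 2) le_rfl hp7j0 rfl (by omega) 0 false
        (by simp [pvPre_self, pvBalI]) (by simp [pvPre_self])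
      simp only [Bool.not_false, zero_add] at e1
      push_cast at e1
      have e2 := stemF_oneA s.toList (j0 + 1) j1 hj1 ((s.toList.length + 2) - (j0 - (p + 7)) - 1)
        (by omega) 2 1 (by norm_num) (by norm_num)
      push_cast at e2
      rw [e1, e2]
      have b1 : bStemEndF (bScan 0 0 s.toList) ((p : Int) + 7)
          (PySem.List.pyRange ((p : Int) + 7) (s.toList.length : Int) 1) = (j0 : Int) := by
        have := bStemEndF_eq s.toList (p + 7) j0 hj0 (j0 - (p + 7)) (p + 7) le_rfl hp7j0 rfl
        push_cast at this
        simpa using this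
      have b2 : bStemEndF (bScan 0 0 s.toList) ((j0 : Int) + 1)
          (PySem.List.pyRange ((j0 : Int) + 1) (s.toList.length : Int) 1) = (j1 : Int) := by
        have := bStemEndF_eq s.toList (j0 + 1) j1 hj1 (j1 - (j0 + 1)) (j0 + 1) le_rfl hj1.1.1 rfl
        push_cast at this
        simpa using this
      rw [b1]
      rw [show (j0 : Int) + 1 = (j0 : Int) + 1 from rfl]
      rw [b2, if_neg (by simp [hv])]
      rw [show s.toList.length + 2 = s.toList.length + 1 + 1 by omega]
      exact aScan2F_vLoop s.toList (s.toList.length + 1) lt hv ((j1 : Int) + 1)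
        (by constructor <;> omega)
    · -- loop_type ≠ vLoop: one (acLoop) or zero stems, then trailing scan
      rw [if_neg hv] at hpre
      rw [if_neg hv, if_neg hv, if_pos hv]
      by_cases hac : lt = "acLoop"
      · rw [if_pos hac] at hpre
        obtain ⟨p, hpn, hfg, j0, hj0n, hj0, m, hmn, hjm, hmc⟩ := hpre
        have hacc : aScanF s.toList (s.toList.length + 2) 0 = (p : Int) := by
          simpa using aScanF_eq s.toList p hfg 0 (s.toList.length + 2) (Nat.zero_le p) (by omega)
        have hfind : PySem.Chars.find s.toList ['>'] = (p : Int) :=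
          char_find_eq s.toList '>' p hfg.1 hfg.2
        rw [if_pos hac, if_pos hac, hacc, hfind, if_neg (by omega)]
        rw [show List.range 1 = [0] from rfl, List.foldl_cons, List.foldl_nil]
        have e1 := stemF_oneA s.toList (p + 7) j0 hj0 (s.toList.length + 2)
          (by omega) 1 0 (by norm_num) (by norm_num)
        push_cast at e1
        rw [e1]
        have b1 : bStemEndF (bScan 0 0 s.toList) ((p : Int) + 7)
            (PySem.List.pyRange ((p : Int) + 7) (s.toList.length : Int) 1) = (j0 : Int) := by
          have := bStemEndF_eq s.toList (p + 7) j0 hj0 (j0 - (p + 7)) (p + 7) le_rfl hj0.1.1 rfl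
          push_cast at this
          simpa using this
        rw [b1]
        obtain ⟨ht1, ht2⟩ := trailF s.toList lt hv (j0 + 1) m (s.toList.length + 2) (by omega) hjm hmc
        push_cast at ht1 ht2
        rw [ht1, if_neg (by omega)]
      · rw [if_neg hac] at hpre
        obtain ⟨p, hpn, hfg, m, hmn, hpm, hmc⟩ := hpre
        have hacc : aScanF s.toList (s.toList.length + 2) 0 = (p : Int) := by
          simpa using aScanF_eq s.toList p hfg 0 (s.toList.length + 2) (Nat.zero_le p) (by omega)
        have hfind : PySem.Chars.find s.toList ['>'] = (p : Int) :=
          char_find_eq s.toList '>' p hfg.1 hfg.2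
        rw [if_neg hac, if_neg hac, hacc, hfind, if_neg (by omega)]
        rw [show List.range 0 = [] from rfl, List.foldl_nil]
        have e1 : aStemF s.toList (s.toList.length + 2) 0 0 0 true ((p : Int) + 7) = (p : Int) + 7 := by
          rw [aStemF.eq_def, if_neg (by norm_num)]
        rw [e1]
        obtain ⟨ht1, ht2⟩ := trailF s.toList lt hv (p + 7) m (s.toList.length + 2) (by omega) hpm hmc
        push_cast at ht1 ht2
        rw [ht1, if_neg (by omega)]
  · by_cases h2 : interval = -1
    · -- backward direction
      rw [Pre_find_sequence_end_index, if_neg h1, if_pos h2] at hpre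
      simp only [find_sequence_end_index, find_sequence_end_index_alt]
      rw [if_neg h1, if_neg h1, if_pos h2, if_pos h2]
      by_cases ht : lt = "tLoop"
      · rw [if_pos ht] at hpre
        obtain ⟨q, hqn, hll⟩ := hpre
        have hn1 : 1 ≤ s.toList.length := by omega
        have hacc : aScanB s.toList (2 * s.toList.length + 9) ((s.toList.length : Int) - 1) = (q : Int) := by
          have := aScanB_eq s.toList q hll (s.toList.length - 1) (2 * s.toList.length + 9) (by omega) (by omega) (by omega)
          rw [show ((s.toList.length - 1 : Nat) : Int) = (s.toList.length : Int) - 1 by omega] at this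
          exact this
        have hrf : PySem.Chars.rfind s.toList ['<'] = (q : Int) :=
          char_rfind_eq s.toList '<' q hll.1 hll.2
        rw [hacc, hrf, if_pos ht, if_neg (show ¬((q : Int) = -1) by omega), if_pos ht]
      · rw [if_neg ht] at hpre
        rw [if_neg ht, if_neg ht]
        by_cases hvB : lt = "vLoop"
        · rw [if_pos hvB] at hpre
          obtain ⟨q, hqn, hll, hq7, j, hji, hj⟩ := hpre
          have hn1 : 1 ≤ s.toList.length := by omega
          have hacc : aScanB s.toList (2 * s.toList.length + 9) ((s.toList.length : Int) - 1) = (q : Int) := by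
            have := aScanB_eq s.toList q hll (s.toList.length - 1) (2 * s.toList.length + 9) (by omega) (by omega) (by omega)
            rw [show ((s.toList.length - 1 : Nat) : Int) = (s.toList.length : Int) - 1 by omega] at this
            exact this
          have hrf : PySem.Chars.rfind s.toList ['<'] = (q : Int) :=
            char_rfind_eq s.toList '<' q hll.1 hll.2
          rw [hacc, hrf, if_pos hvB, if_neg (show ¬((q : Int) = -1) by omega), if_pos hvB]
          have e1 := stemB_runA s.toList (q - 7) j (by omega) hj ((q - 7) - j) (q - 7)
            (2 * s.toList.length + 9) hji le_rfl rfl (by omega) 0 false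
            (by simp [pvSeg, pvBalI]) (by simp [pvSeg])
          simp only [Bool.not_false] at e1
          rw [show ((q - 7 : Nat) : Int) = (q : Int) - 7 by omega] at e1
          rw [e1]
          have b1 : bStemEndB (bScan 0 0 s.toList) ((q : Int) - 7)
              (PySem.List.pyRange ((q : Int) - 7) (-1) (-1)) = (j : Int) := by
            have := bStemEndB_eq s.toList (q - 7) j (by omega) hj ((q - 7) - j) (q - 7) hji le_rfl rfl
            rw [show ((q - 7 : Nat) : Int) = (q : Int) - 7 by omega] at this
            exact this
          rw [b1]
          rw [show 2 * s.toList.length + 9 = 2 * s.toList.length + 8 + 1 by omega]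
          exact aScan2B_vLoop s.toList (2 * s.toList.length + 8) lt hvB ((j : Int) - 1)
            (by constructor <;> omega)
        · rw [if_neg hvB] at hpre
          obtain ⟨q, hqn, hll, hq7, k, hki, hkc⟩ := hpre
          have hn1 : 1 ≤ s.toList.length := by omega
          have hacc : aScanB s.toList (2 * s.toList.length + 9) ((s.toList.length : Int) - 1) = (q : Int) := by
            have := aScanB_eq s.toList q hll (s.toList.length - 1) (2 * s.toList.length + 9) (by omega) (by omega) (by omega)
            rw [show ((s.toList.length - 1 : Nat) : Int) = (s.toList.length : Int) - 1 by omega] at this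
            exact this
          have hrf : PySem.Chars.rfind s.toList ['<'] = (q : Int) :=
            char_rfind_eq s.toList '<' q hll.1 hll.2
          rw [hacc, hrf, if_neg hvB, if_neg (show ¬((q : Int) = -1) by omega), if_neg hvB]
          have e1 : aStemB s.toList (2 * s.toList.length + 9) 0 0 0 true ((q : Int) - 7) = (q : Int) - 7 := by
            rw [aStemB.eq_def, if_neg (by norm_num)]
          rw [e1]
          have := trailB s.toList lt hvB (q - 7) k (2 * s.toList.length + 9) (by omega) (by omega) hki hkc
          rw [show ((q - 7 : Nat) : Int) = (q : Int) - 7 by omega] at this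
          exact this
    · -- interval is neither 1 nor -1: both return -1
      simp only [find_sequence_end_index, find_sequence_end_index_alt]
      rw [if_neg h1, if_neg h1, if_neg h2, if_neg h2]
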